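-- pv_equiv track=rewrite | github.com/Akshita3104/Invoice-Data-Extractor | backend/ocr/engines/trocr_engine.py | _merge_into_lines
-- ===== SOURCE A (Python) =====
-- from typing import Dict, List
--
-- def _merge_into_lines(bboxes: List[Dict], image_height: int, threshold: int = 10) -> List[Dict]:
--     """
--     Merge overlapping bounding boxes into lines
--     """
--     if not bboxes:
--         return []
--
--     lines = []
--     current_line = bboxes[0].copy()
--
--     for bbox in bboxes[1:]:
--         # Check if bbox overlaps with current line (Y axis)
--         if abs(bbox['y'] - current_line['y']) < threshold:
--             # Merge into current line
--             right = max(current_line['x'] + current_line['width'], bbox['x'] + bbox['width'])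
--             bottom = max(current_line['y'] + current_line['height'], bbox['y'] + bbox['height'])
--
--             current_line['x'] = min(current_line['x'], bbox['x'])
--             current_line['y'] = min(current_line['y'], bbox['y'])
--             current_line['width'] = right - current_line['x']
--             current_line['height'] = bottom - current_line['y']
--         else:
--             # Start new line
--             lines.append(current_line)
--             current_line = bbox.copy()
--
--     # Add last line
--     lines.append(current_line)
--
--     return lines
-- ===== SOURCE B (Python) =====
-- def _merge_into_lines(bboxes, image_height, threshold=10):
--     """Merge overlapping bounding boxes into lines (partition into groups, then reduce)."""
--     if len(bboxes) < 2:
--         return [b.copy() for b in bboxes]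
--     # Pass 1: partition into groups, tracking the running minimum y of the open group.
--     groups = []
--     min_y = bboxes[0]['y']
--     members = [bboxes[0]]
--     for bbox in bboxes[1:]:
--         if abs(bbox['y'] - min_y) < threshold:
--             min_y = min(min_y, bbox['y'])
--             members.append(bbox)
--         else:
--             groups.append(members)
--             min_y = bbox['y']
--             members = [bbox]
--     groups.append(members)
--     # Pass 2: reduce each group to one line dict.
--     return [_reduce_group(g) for g in groups]
--
--
-- def _reduce_group(group):
--     if len(group) == 1:
--         return group[0].copy()
--     line = group[0].copy()
--     x = min(b['x'] for b in group)
--     y = min(b['y'] for b in group)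
--     line['x'] = x
--     line['y'] = y
--     line['width'] = max(b['x'] + b['width'] for b in group) - x
--     line['height'] = max(b['y'] + b['height'] for b in group) - y
--     return line
-- ===== Notes on version B (the rewrite author's own statement) =====
-- stated objective: alternative
-- what changed: A maintains one incrementally-merged box dict and rewrites its four geometry fields at every merge; B decomposes the task into a partition pass (grouping boxes by the running minimum y) followed by a reduce pass that builds each line dict once from min/max aggregates of its group (singleton groups and trivial lists are returned as plain copies).
import Mathlib
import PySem

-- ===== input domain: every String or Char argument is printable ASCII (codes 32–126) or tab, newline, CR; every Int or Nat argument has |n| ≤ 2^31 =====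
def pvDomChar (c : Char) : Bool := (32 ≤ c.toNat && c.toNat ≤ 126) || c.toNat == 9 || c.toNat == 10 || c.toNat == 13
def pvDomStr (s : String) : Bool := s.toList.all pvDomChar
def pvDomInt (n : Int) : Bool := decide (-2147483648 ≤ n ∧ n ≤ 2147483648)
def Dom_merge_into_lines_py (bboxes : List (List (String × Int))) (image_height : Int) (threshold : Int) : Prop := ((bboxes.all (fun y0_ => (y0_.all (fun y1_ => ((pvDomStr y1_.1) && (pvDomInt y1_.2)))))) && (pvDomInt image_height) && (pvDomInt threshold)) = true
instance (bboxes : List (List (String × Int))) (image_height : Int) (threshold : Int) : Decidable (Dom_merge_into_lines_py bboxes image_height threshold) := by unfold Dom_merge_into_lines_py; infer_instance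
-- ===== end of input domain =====

-- B replaces A's incremental merged-box accumulator by a two-pass decomposition (partition into
-- groups tracking the running min y, then reduce each group with min/max aggregates); equivalence
-- is about the return value (A mutates no argument).

-- ===== PORT A =====
-- dict access d[k] is modelled by getD with a junk default 0; exact wherever the key is present,
-- which Pre_merge_into_lines_py guarantees (a missing key is Python's KeyError).
def pvMergeA (cur b : PySem.Dict String Int) : PySem.Dict String Int :=
  let right := max (cur.getD "x" 0 + cur.getD "width" 0) (b.getD "x" 0 + b.getD "width" 0)
  let bottom := max (cur.getD "y" 0 + cur.getD "height" 0) (b.getD "y" 0 + b.getD "height" 0)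
  let cur := cur.insert "x" (min (cur.getD "x" 0) (b.getD "x" 0))
  let cur := cur.insert "y" (min (cur.getD "y" 0) (b.getD "y" 0))
  let cur := cur.insert "width" (right - cur.getD "x" 0)
  let cur := cur.insert "height" (bottom - cur.getD "y" 0)
  cur

def pvStepA (threshold : Int) (st : List (PySem.Dict String Int) × PySem.Dict String Int)
    (bb : List (String × Int)) : List (PySem.Dict String Int) × PySem.Dict String Int :=
  let b : PySem.Dict String Int := PySem.Dict.mk bb
  if |b.getD "y" 0 - st.2.getD "y" 0| < threshold then (st.1, pvMergeA st.2 b)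
  else (st.1 ++ [st.2], b)

def merge_into_lines_py (bboxes : List (List (String × Int))) (image_height : Int) (threshold : Int) : List (List (String × Int)) :=
  match bboxes with
  | [] => []
  | b0 :: rest =>
    let st := rest.foldl (pvStepA threshold) ([], PySem.Dict.mk b0)
    (st.1 ++ [st.2]).map PySem.Dict.items

-- ===== PORT B =====
-- _reduce_group: copy of the group's first box with min/max aggregates written in.
def pvReduceGroup (grp : List (PySem.Dict String Int)) : PySem.Dict String Int :=
  match grp with
  | [] => PySem.Dict.mk []          -- unreachable: groups are never empty
  | [h] => h                        -- a group of one box is copied unchanged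
  | h :: _ =>
    let x := (PySem.List.min? (grp.map (fun b => b.getD "x" 0)) (fun v => v)).getD 0
    let y := (PySem.List.min? (grp.map (fun b => b.getD "y" 0)) (fun v => v)).getD 0
    let line := (h.insert "x" x).insert "y" y
    let line := line.insert "width"
      ((PySem.List.max? (grp.map (fun b => b.getD "x" 0 + b.getD "width" 0)) (fun v => v)).getD 0 - x)
    let line := line.insert "height"
      ((PySem.List.max? (grp.map (fun b => b.getD "y" 0 + b.getD "height" 0)) (fun v => v)).getD 0 - y)
    line

-- pass 1 step: state = (closed groups, running min y of open group, open group members)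
def pvStepB (threshold : Int)
    (st : List (List (PySem.Dict String Int)) × Int × List (PySem.Dict String Int))
    (bb : List (String × Int)) : List (List (PySem.Dict String Int)) × Int × List (PySem.Dict String Int) :=
  let b : PySem.Dict String Int := PySem.Dict.mk bb
  if |b.getD "y" 0 - st.2.1| < threshold then (st.1, min st.2.1 (b.getD "y" 0), st.2.2 ++ [b])
  else (st.1 ++ [st.2.2], b.getD "y" 0, [b])

def merge_into_lines_py_alt (bboxes : List (List (String × Int))) (image_height : Int) (threshold : Int) : List (List (String × Int)) :=
  if bboxes.length < 2 then bboxes   -- copies, i.e. the same values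
  else match bboxes with
  | [] => []
  | b0 :: rest =>
    let d0 : PySem.Dict String Int := PySem.Dict.mk b0
    let st := rest.foldl (pvStepB threshold) ([], d0.getD "y" 0, [d0])
    ((st.1 ++ [st.2.2]).map pvReduceGroup).map PySem.Dict.items

-- ===== PRECONDITION & SPEC =====
-- Pre_ admits trivial lists and otherwise asks every box for the four geometry keys: a
-- multi-box list with a key missing raises KeyError on almost every path of A (whether it
-- returns depends on which boxes happen to merge), and it excludes duplicate keys inside one
-- box, which a real Python dict cannot have (only our List encoding can).
def Pre_merge_into_lines_py (bboxes : List (List (String × Int))) (image_height : Int) (threshold : Int) : Prop :=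
  bboxes.length ≤ 1 ∨ ∀ bb ∈ bboxes,
    ((PySem.Dict.mk bb).contains "x" = true ∧ (PySem.Dict.mk bb).contains "y" = true ∧
     (PySem.Dict.mk bb).contains "width" = true ∧ (PySem.Dict.mk bb).contains "height" = true) ∧
    (bb.map Prod.fst).Nodup
instance (bboxes : List (List (String × Int))) (image_height : Int) (threshold : Int) : Decidable (Pre_merge_into_lines_py bboxes image_height threshold) := by unfold Pre_merge_into_lines_py; infer_instance

def pvWitness_merge_into_lines_py : (List (List (String × Int))) × Int × Int :=
  ([[("text", 7), ("x", 0), ("y", 0), ("width", 5), ("height", 4)],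
    [("x", 6), ("y", 2), ("width", 3), ("height", 4)],
    [("x", 1), ("y", 30), ("width", 2), ("height", 2)]], 100, 10)

def Spec_merge_into_lines_py (bboxes : List (List (String × Int))) (image_height : Int) (threshold : Int) (out : List (List (String × Int))) : Prop := out = merge_into_lines_py_alt bboxes image_height threshold
instance (bboxes : List (List (String × Int))) (image_height : Int) (threshold : Int) (out : List (List (String × Int))) : Decidable (Spec_merge_into_lines_py bboxes image_height threshold out) := by unfold Spec_merge_into_lines_py; infer_instance

-- ===== CLAIM (what is proved, stated in full; the proofs are below) =====
def Claim_equal_merge_into_lines_py : Prop := ∀ (bboxes : List (List (String × Int))) (image_height : Int) (threshold : Int), Dom_merge_into_lines_py bboxes image_height threshold → Pre_merge_into_lines_py bboxes image_height threshold → Spec_merge_into_lines_py bboxes image_height threshold (merge_into_lines_py bboxes image_height threshold)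

-- ===== LEMMAS AND PROOFS =====

-- a box with all four geometry keys
def pvHasKeys (d : PySem.Dict String Int) : Prop :=
  d.contains "x" = true ∧ d.contains "y" = true ∧ d.contains "width" = true ∧ d.contains "height" = true

-- min/max aggregates of a group, as the B pass computes them
def pvAggMin (f : PySem.Dict String Int → Int) (grp : List (PySem.Dict String Int)) : Int :=
  (PySem.List.min? (grp.map f) (fun v => v)).getD 0
def pvAggMax (f : PySem.Dict String Int → Int) (grp : List (PySem.Dict String Int)) : Int :=
  (PySem.List.max? (grp.map f) (fun v => v)).getD 0

theorem pvWitness_ok : Dom_merge_into_lines_py (pvWitness_merge_into_lines_py.1) (pvWitness_merge_into_lines_py.2.1) (pvWitness_merge_into_lines_py.2.2) ∧ Pre_merge_into_lines_py (pvWitness_merge_into_lines_py.1) (pvWitness_merge_into_lines_py.2.1) (pvWitness_merge_into_lines_py.2.2) := by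
  constructor <;> decide

lemma pvAggMin_cons (f : PySem.Dict String Int → Int) (h : PySem.Dict String Int)
    (t : List (PySem.Dict String Int)) :
    pvAggMin f (h :: t) = t.foldl (fun a b => min a (f b)) (f h) := by
  simp [pvAggMin, PySem.List.min?_id_cons, List.foldl_map]

lemma pvAggMax_cons (f : PySem.Dict String Int → Int) (h : PySem.Dict String Int)
    (t : List (PySem.Dict String Int)) :
    pvAggMax f (h :: t) = t.foldl (fun a b => max a (f b)) (f h) := by
  simp [pvAggMax, PySem.List.max?_id_cons, List.foldl_map]

lemma pvAggMin_append (f : PySem.Dict String Int → Int) (h : PySem.Dict String Int)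
    (t : List (PySem.Dict String Int)) (b : PySem.Dict String Int) :
    pvAggMin f (h :: (t ++ [b])) = min (pvAggMin f (h :: t)) (f b) := by
  simp [pvAggMin_cons, List.foldl_append]

lemma pvAggMax_append (f : PySem.Dict String Int → Int) (h : PySem.Dict String Int)
    (t : List (PySem.Dict String Int)) (b : PySem.Dict String Int) :
    pvAggMax f (h :: (t ++ [b])) = max (pvAggMax f (h :: t)) (f b) := by
  simp [pvAggMax_cons, List.foldl_append]

lemma pvAggMin_single (f : PySem.Dict String Int → Int) (d : PySem.Dict String Int) :
    pvAggMin f [d] = f d := by simp [pvAggMin_cons]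

lemma pvAggMax_single (f : PySem.Dict String Int → Int) (d : PySem.Dict String Int) :
    pvAggMax f [d] = f d := by simp [pvAggMax_cons]

-- two inserts at distinct keys commute when the first key is already present
lemma pv_insert_comm (d : PySem.Dict String Int) (k k' : String) (v v' : Int)
    (hk : d.contains k = true) (hne : k ≠ k') :
    (d.insert k v).insert k' v' = (d.insert k' v').insert k v := by
  apply PySem.Dict.ext
  by_cases hk' : d.contains k' = true
  · rw [PySem.Dict.items_insert_of_contains _ _ (by simp [PySem.Dict.contains_insert, hk'])]
    rw [PySem.Dict.items_insert_of_contains _ _ hk]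
    rw [PySem.Dict.items_insert_of_contains _ _ (by simp [PySem.Dict.contains_insert, hk])]
    rw [PySem.Dict.items_insert_of_contains _ _ hk']
    simp only [List.map_map]
    apply List.map_congr_left
    intro p _
    by_cases h1 : p.1 = k <;> by_cases h2 : p.1 = k' <;>
      simp_all [Function.comp, Ne.symm hne]
  · have hk'f : d.contains k' = false := by simpa using hk'
    rw [PySem.Dict.items_insert_of_not_contains _ _
        (by simp [PySem.Dict.contains_insert, hk'f]; exact Ne.symm hne)]
    rw [PySem.Dict.items_insert_of_contains _ _ hk]
    rw [PySem.Dict.items_insert_of_contains _ _ (by simp [PySem.Dict.contains_insert, hk])]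
    rw [PySem.Dict.items_insert_of_not_contains _ _ hk'f]
    simp [Ne.symm hne]

-- re-inserting a key's own value changes nothing (unique keys)
lemma pv_insert_getD_self (d : PySem.Dict String Int) (k : String)
    (hk : d.contains k = true) (hnd : d.keys.Nodup) :
    d.insert k (d.getD k 0) = d := by
  apply PySem.Dict.ext
  rw [PySem.Dict.items_insert_of_contains _ _ hk]
  conv_rhs => rw [← List.map_id d.items]
  apply List.map_congr_left
  intro p hp
  by_cases h1 : p.1 = k
  · have : (p.1, p.2) ∈ d.items := by simpa using hp
    rw [h1] at this
    have h2 := PySem.Dict.getD_of_mem_items d this hnd 0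
    rw [h1, h2, ← h1]
    simp
  · simp [h1]

-- the canonical shape of a reduced group (for a singleton group via re-insertion of own values)
lemma pvReduceGroup_eq (h : PySem.Dict String Int) (t : List (PySem.Dict String Int))
    (hk : pvHasKeys h) (hnd : h.keys.Nodup) :
    pvReduceGroup (h :: t) =
      (((h.insert "x" (pvAggMin (fun b => b.getD "x" 0) (h :: t))).insert "y"
          (pvAggMin (fun b => b.getD "y" 0) (h :: t))).insert "width"
          (pvAggMax (fun b => b.getD "x" 0 + b.getD "width" 0) (h :: t) -
            pvAggMin (fun b => b.getD "x" 0) (h :: t))).insert "height"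
          (pvAggMax (fun b => b.getD "y" 0 + b.getD "height" 0) (h :: t) -
            pvAggMin (fun b => b.getD "y" 0) (h :: t)) := by
  obtain ⟨hx, hy, hw, hh⟩ := hk
  cases t with
  | nil =>
    show h = _
    rw [pvAggMin_single, pvAggMin_single, pvAggMax_single, pvAggMax_single]
    rw [show h.getD "x" 0 + h.getD "width" 0 - h.getD "x" 0 = h.getD "width" 0 by ring]
    rw [show h.getD "y" 0 + h.getD "height" 0 - h.getD "y" 0 = h.getD "height" 0 by ring]
    rw [pv_insert_getD_self h "x" hx hnd]
    rw [pv_insert_getD_self h "y" hy hnd]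
    rw [pv_insert_getD_self h "width" hw hnd]
    rw [pv_insert_getD_self h "height" hh hnd]
  | cons c t' => simp [pvReduceGroup, pvAggMin, pvAggMax]

lemma pvReduceGroup_getD_x (h : PySem.Dict String Int) (t : List (PySem.Dict String Int))
    (hk : pvHasKeys h) (hnd : h.keys.Nodup) :
    (pvReduceGroup (h :: t)).getD "x" 0 = pvAggMin (fun b => b.getD "x" 0) (h :: t) := by
  rw [pvReduceGroup_eq h t hk hnd]
  rw [PySem.Dict.getD_insert_of_ne _ _ _ (by decide), PySem.Dict.getD_insert_of_ne _ _ _ (by decide),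
      PySem.Dict.getD_insert_of_ne _ _ _ (by decide), PySem.Dict.getD_insert_self]

lemma pvReduceGroup_getD_y (h : PySem.Dict String Int) (t : List (PySem.Dict String Int))
    (hk : pvHasKeys h) (hnd : h.keys.Nodup) :
    (pvReduceGroup (h :: t)).getD "y" 0 = pvAggMin (fun b => b.getD "y" 0) (h :: t) := by
  rw [pvReduceGroup_eq h t hk hnd]
  rw [PySem.Dict.getD_insert_of_ne _ _ _ (by decide), PySem.Dict.getD_insert_of_ne _ _ _ (by decide),
      PySem.Dict.getD_insert_self]

lemma pvReduceGroup_getD_w (h : PySem.Dict String Int) (t : List (PySem.Dict String Int))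
    (hk : pvHasKeys h) (hnd : h.keys.Nodup) :
    (pvReduceGroup (h :: t)).getD "width" 0 =
      pvAggMax (fun b => b.getD "x" 0 + b.getD "width" 0) (h :: t) -
        pvAggMin (fun b => b.getD "x" 0) (h :: t) := by
  rw [pvReduceGroup_eq h t hk hnd]
  rw [PySem.Dict.getD_insert_of_ne _ _ _ (by decide), PySem.Dict.getD_insert_self]

lemma pvReduceGroup_getD_h (h : PySem.Dict String Int) (t : List (PySem.Dict String Int))
    (hk : pvHasKeys h) (hnd : h.keys.Nodup) :
    (pvReduceGroup (h :: t)).getD "height" 0 =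
      pvAggMax (fun b => b.getD "y" 0 + b.getD "height" 0) (h :: t) -
        pvAggMin (fun b => b.getD "y" 0) (h :: t) := by
  rw [pvReduceGroup_eq h t hk hnd, PySem.Dict.getD_insert_self]

-- overwriting a full x/y/width/height chain collapses to a single chain
lemma pv_chain_collapse (d : PySem.Dict String Int) (hk : pvHasKeys d)
    (X Y W H X' Y' W' H' : Int) :
    (((((((d.insert "x" X).insert "y" Y).insert "width" W).insert "height" H).insert "x"
        X').insert "y" Y').insert "width" W').insert "height" H' =
    (((d.insert "x" X').insert "y" Y').insert "width" W').insert "height" H' := by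
  obtain ⟨hx, hy, hw, hh⟩ := hk
  rw [pv_insert_comm _ "height" "x" H X'
        (by simp [PySem.Dict.contains_insert, hh]) (by decide)]
  rw [pv_insert_comm _ "width" "x" W X'
        (by simp [PySem.Dict.contains_insert, hw]) (by decide)]
  rw [pv_insert_comm _ "y" "x" Y X'
        (by simp [PySem.Dict.contains_insert, hy]) (by decide)]
  rw [PySem.Dict.insert_insert_self]
  rw [pv_insert_comm _ "height" "y" H Y'
        (by simp [PySem.Dict.contains_insert, hh]) (by decide)]
  rw [pv_insert_comm _ "width" "y" W Y'
        (by simp [PySem.Dict.contains_insert, hw]) (by decide)]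
  rw [PySem.Dict.insert_insert_self]
  rw [pv_insert_comm _ "height" "width" H W'
        (by simp [PySem.Dict.contains_insert, hh]) (by decide)]
  rw [PySem.Dict.insert_insert_self, PySem.Dict.insert_insert_self]

-- pvMergeA with its internal getD reads resolved
lemma pvMergeA_eq (cur b : PySem.Dict String Int) :
    pvMergeA cur b =
      (((cur.insert "x" (min (cur.getD "x" 0) (b.getD "x" 0))).insert "y"
          (min (cur.getD "y" 0) (b.getD "y" 0))).insert "width"
          (max (cur.getD "x" 0 + cur.getD "width" 0) (b.getD "x" 0 + b.getD "width" 0) -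
            min (cur.getD "x" 0) (b.getD "x" 0))).insert "height"
          (max (cur.getD "y" 0 + cur.getD "height" 0) (b.getD "y" 0 + b.getD "height" 0) -
            min (cur.getD "y" 0) (b.getD "y" 0)) := by
  simp only [pvMergeA]
  simp [PySem.Dict.getD_insert_of_ne, PySem.Dict.getD_insert_self]

-- A's merge of one more box into a reduced group = reduction of the extended group
lemma pv_merge_step (h : PySem.Dict String Int) (t : List (PySem.Dict String Int))
    (hk : pvHasKeys h) (hnd : h.keys.Nodup) (b : PySem.Dict String Int) :
    pvMergeA (pvReduceGroup (h :: t)) b = pvReduceGroup (h :: (t ++ [b])) := by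
  rw [pvMergeA_eq]
  rw [pvReduceGroup_getD_x h t hk hnd, pvReduceGroup_getD_y h t hk hnd,
      pvReduceGroup_getD_w h t hk hnd, pvReduceGroup_getD_h h t hk hnd]
  rw [pvReduceGroup_eq h (t ++ [b]) hk hnd]
  rw [pvAggMin_append, pvAggMin_append, pvAggMax_append, pvAggMax_append]
  rw [pvReduceGroup_eq h t hk hnd]
  rw [pv_chain_collapse h hk]
  congr 2
  · omega
  · omega

-- main loop invariant: A's running state is the reduction of B's running partition
lemma pv_loop (threshold : Int) :
    ∀ (rest : List (List (String × Int)))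
      (gs : List (List (PySem.Dict String Int))) (h : PySem.Dict String Int)
      (t : List (PySem.Dict String Int)), pvHasKeys h → h.keys.Nodup →
      (∀ bb ∈ rest,
        ((PySem.Dict.mk bb).contains "x" = true ∧ (PySem.Dict.mk bb).contains "y" = true ∧
         (PySem.Dict.mk bb).contains "width" = true ∧ (PySem.Dict.mk bb).contains "height" = true) ∧
        (bb.map Prod.fst).Nodup) →
      (let st := rest.foldl (pvStepA threshold) (gs.map pvReduceGroup, pvReduceGroup (h :: t))
       st.1 ++ [st.2]) =
      (let st := rest.foldl (pvStepB threshold)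
          (gs, pvAggMin (fun b => b.getD "y" 0) (h :: t), h :: t)
       (st.1 ++ [st.2.2]).map pvReduceGroup) := by
  intro rest
  induction rest with
  | nil =>
    intro gs h t _ _ _
    simp [List.foldl_nil]
  | cons b rest ih =>
    intro gs h t hk hnd hrest
    have hb := hrest b List.mem_cons_self
    have hr' : ∀ bb ∈ rest,
        ((PySem.Dict.mk bb).contains "x" = true ∧ (PySem.Dict.mk bb).contains "y" = true ∧
         (PySem.Dict.mk bb).contains "width" = true ∧ (PySem.Dict.mk bb).contains "height" = true) ∧
        (bb.map Prod.fst).Nodup := fun bb hm => hrest bb (List.mem_cons_of_mem _ hm)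
    by_cases hc : |(PySem.Dict.mk b).getD "y" 0 - pvAggMin (fun d => d.getD "y" 0) (h :: t)| < threshold
    · have hA : pvStepA threshold (gs.map pvReduceGroup, pvReduceGroup (h :: t)) b
          = (gs.map pvReduceGroup, pvReduceGroup (h :: (t ++ [PySem.Dict.mk b]))) := by
        simp only [pvStepA]
        rw [pvReduceGroup_getD_y h t hk hnd, if_pos hc, pv_merge_step h t hk hnd]
      have hB : pvStepB threshold (gs, pvAggMin (fun b => b.getD "y" 0) (h :: t), h :: t) b
          = (gs, pvAggMin (fun b => b.getD "y" 0) (h :: (t ++ [PySem.Dict.mk b])),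
             h :: (t ++ [PySem.Dict.mk b])) := by
        simp only [pvStepB]
        rw [if_pos hc, pvAggMin_append]
        simp
      simp only [List.foldl_cons, hA, hB]
      exact ih gs h (t ++ [PySem.Dict.mk b]) hk hnd hr'
    · have hkb : pvHasKeys (PySem.Dict.mk b) := hb.1
      have hndb : (PySem.Dict.mk b).keys.Nodup := by
        rw [PySem.Dict.keys_mk]; exact hb.2
      have hA : pvStepA threshold (gs.map pvReduceGroup, pvReduceGroup (h :: t)) b
          = ((gs ++ [h :: t]).map pvReduceGroup, pvReduceGroup [PySem.Dict.mk b]) := by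
        simp only [pvStepA]
        rw [pvReduceGroup_getD_y h t hk hnd, if_neg hc, List.map_append, List.map_singleton]
        rfl
      have hB : pvStepB threshold (gs, pvAggMin (fun b => b.getD "y" 0) (h :: t), h :: t) b
          = (gs ++ [h :: t], pvAggMin (fun b => b.getD "y" 0) [PySem.Dict.mk b],
             [PySem.Dict.mk b]) := by
        simp only [pvStepB]
        rw [if_neg hc, pvAggMin_single]
      simp only [List.foldl_cons, hA, hB]
      exact ih (gs ++ [h :: t]) (PySem.Dict.mk b) [] hkb hndb hr'

theorem merge_into_lines_py_spec : Claim_equal_merge_into_lines_py := by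
  intro bboxes image_height threshold _ hpre
  unfold Spec_merge_into_lines_py
  cases bboxes with
  | nil => rfl
  | cons b0 rest =>
    cases rest with
    | nil => rfl
    | cons b1 rest' =>
      have hall : ∀ bb ∈ b0 :: b1 :: rest',
          ((PySem.Dict.mk bb).contains "x" = true ∧ (PySem.Dict.mk bb).contains "y" = true ∧
           (PySem.Dict.mk bb).contains "width" = true ∧ (PySem.Dict.mk bb).contains "height" = true) ∧
          (bb.map Prod.fst).Nodup := by
        rcases hpre with hlen | hall
        · simp at hlen
        · exact hall
      have h0 := hall b0 List.mem_cons_self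
      have hk0 : pvHasKeys (PySem.Dict.mk b0) := h0.1
      have hnd0 : (PySem.Dict.mk b0).keys.Nodup := by
        rw [PySem.Dict.keys_mk]; exact h0.2
      have hr : ∀ bb ∈ b1 :: rest',
          ((PySem.Dict.mk bb).contains "x" = true ∧ (PySem.Dict.mk bb).contains "y" = true ∧
           (PySem.Dict.mk bb).contains "width" = true ∧ (PySem.Dict.mk bb).contains "height" = true) ∧
          (bb.map Prod.fst).Nodup := fun bb hm => hall bb (List.mem_cons_of_mem _ hm)
      have hg : ¬ ((b0 :: b1 :: rest').length < 2) := by simp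
      have hl := pv_loop threshold (b1 :: rest') [] (PySem.Dict.mk b0) [] hk0 hnd0 hr
      unfold merge_into_lines_py merge_into_lines_py_alt
      rw [if_neg hg]
      exact congrArg (List.map PySem.Dict.items) hl
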